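-- pv_equiv track=rewrite | github.com/YuvrajSonavane-aka-Fudo/BluePineapple | PythonPrograms/16.12.25/No25.py | productNonRepeated
-- ===== SOURCE A (Python) =====
-- from collections import defaultdict
--
-- def productNonRepeated(list1):
--     if list1 == []:
--         return 0
--
--     dict1 = defaultdict(int)
--     prod = 1
--     for i in list1 :
--         dict1[i] += 1
--
--     for k , v in dict1.items():
--         if v == 1:
--             prod *= k
--
--     return prod
-- ===== SOURCE B (Python) =====
-- def productNonRepeated(list1):
--     if list1 == []:
--         return 0
--     s = sorted(list1)
--     prod = 1
--     i = 0
--     n = len(s)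
--     while i < n:
--         j = i
--         while j < n and s[j] == s[i]:
--             j += 1
--         if j - i == 1:
--             prod *= s[i]
--         i = j
--     return prod
-- ===== Notes on version B (the rewrite author's own statement) =====
-- stated objective: alternative
-- what changed: Replaces the defaultdict count-then-iterate strategy with a sort followed by a single linear scan over runs of equal elements, multiplying in each value whose run has length exactly 1.
import Mathlib
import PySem

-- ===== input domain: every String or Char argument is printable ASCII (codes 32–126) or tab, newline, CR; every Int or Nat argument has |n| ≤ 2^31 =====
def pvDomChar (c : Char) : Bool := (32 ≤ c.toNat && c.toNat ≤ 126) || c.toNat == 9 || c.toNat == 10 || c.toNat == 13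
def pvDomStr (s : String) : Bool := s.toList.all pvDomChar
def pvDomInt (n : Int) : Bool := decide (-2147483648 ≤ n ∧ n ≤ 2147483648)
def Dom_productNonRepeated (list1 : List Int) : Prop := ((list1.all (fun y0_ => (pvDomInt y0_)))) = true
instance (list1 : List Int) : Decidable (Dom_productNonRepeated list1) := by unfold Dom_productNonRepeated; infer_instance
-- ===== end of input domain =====

-- B replaces A's defaultdict count-then-iterate with a sort followed by one grouped
-- scan over runs of equal elements (objective: alternative algorithm, same results).

-- ===== PORT A =====
def productNonRepeated (list1 : List Int) : Int :=
  if list1 = [] then 0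
  else
    let dict1 : PySem.Dict Int Int :=
      list1.foldl (fun d i => d.modify i 0 (· + 1)) PySem.Dict.empty
    let prod : Int :=
      dict1.items.foldl (fun p kv => if kv.2 = 1 then p * kv.1 else p) 1
    prod

-- ===== PORT B =====
-- outer while loop of Source B: take the run of elements equal to the head, multiply
-- the head in iff the run has length 1, continue after the run
def pvScanRuns : List Int → Int → Int
  | [], prod => prod
  | x :: rest, prod =>
      let run := rest.takeWhile (fun y => y == x)
      let rest' := rest.dropWhile (fun y => y == x)
      pvScanRuns rest' (if run.length + 1 = 1 then prod * x else prod)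
termination_by l _ => l.length
decreasing_by
  simpa using Nat.lt_succ_of_le (List.length_dropWhile_le _ _)

def productNonRepeated_alt (list1 : List Int) : Int :=
  if list1 = [] then 0
  else pvScanRuns (PySem.List.sorted list1 (fun x => x) false) 1

-- ===== PRECONDITION & SPEC =====
def Spec_productNonRepeated (list1 : List Int) (out : Int) : Prop := out = productNonRepeated_alt list1
instance (list1 : List Int) (out : Int) : Decidable (Spec_productNonRepeated list1 out) := by unfold Spec_productNonRepeated; infer_instance

-- ===== CLAIM (what is proved, stated in full; the proofs are below) =====
def Claim_equal_productNonRepeated : Prop := ∀ (list1 : List Int), Dom_productNonRepeated list1 → Spec_productNonRepeated list1 (productNonRepeated list1)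

-- ===== LEMMAS AND PROOFS =====

-- the canonical value both programs compute on a nonempty list:
-- product of the values occurring exactly once, peeled off one distinct value at a time
def pvCanon : List Int → Int
  | [] => 1
  | x :: rest =>
      (if rest.count x = 0 then x else 1) * pvCanon (rest.filter (fun y => ¬ y = x))
termination_by l => l.length
decreasing_by
  refine Nat.lt_succ_of_le ?_
  simpa using List.length_filter_le _ rest.attach

lemma foldl_if_mul (c : Int → Prop) [DecidablePred c] (l : List Int) (a : Int) :
    l.foldl (fun p k => if c k then p * k else p) a
      = a * (l.map (fun k => if c k then k else (1 : Int))).prod := by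
  induction l generalizing a with
  | nil => simp
  | cons x t ih =>
      simp only [List.foldl_cons, List.map_cons, List.prod_cons, ih]
      split_ifs <;> ring

lemma set_add_of_mem (s : PySem.Set Int) (y : Int) (h : y ∈ s) :
    PySem.Set.add s y = s := by
  simp [PySem.Set.add, PySem.Set.contains, h]

lemma set_add_cons_of_ne (s : List Int) (x y : Int) (h : ¬ y = x) :
    PySem.Set.add (x :: s) y = x :: PySem.Set.add s y := by
  simp only [PySem.Set.add, PySem.Set.contains, List.contains_cons]
  have : (y == x) = false := by simpa using h
  rw [this]
  by_cases hm : y ∈ s <;> simp [hm]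

lemma foldl_add_cons (l : List Int) (x : Int) (s : List Int)
    (h : ∀ y ∈ l, ¬ y = x) :
    l.foldl PySem.Set.add (x :: s) = x :: l.foldl PySem.Set.add s := by
  induction l generalizing s with
  | nil => rfl
  | cons y t ih =>
      simp only [List.foldl_cons]
      rw [set_add_cons_of_ne s x y (h y (by simp))]
      exact ih _ (fun z hz => h z (by simp [hz]))

lemma foldl_add_filter (l : List Int) (s : List Int) (x : Int) (hx : x ∈ s) :
    l.foldl PySem.Set.add s = (l.filter (fun y => ¬ y = x)).foldl PySem.Set.add s := by
  induction l generalizing s with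
  | nil => rfl
  | cons y t ih =>
      by_cases hyx : y = x
      · subst hyx
        rw [List.filter_cons_of_neg (by simp), List.foldl_cons, set_add_of_mem s y hx]
        exact ih s hx
      · rw [List.filter_cons_of_pos (by simpa using hyx), List.foldl_cons, List.foldl_cons]
        refine ih _ ?_
        simp [PySem.Set.add]
        split <;> simp [hx]

lemma ofList_cons_filter (x : Int) (rest : List Int) :
    PySem.Set.ofList (x :: rest)
      = x :: PySem.Set.ofList (rest.filter (fun y => ¬ y = x)) := by
  show List.foldl PySem.Set.add (PySem.Set.add PySem.Set.empty x) rest = _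
  have hadd : PySem.Set.add PySem.Set.empty x = [x] := by
    simp [PySem.Set.add, PySem.Set.empty, PySem.Set.contains]
  rw [hadd, foldl_add_filter rest [x] x (by simp),
    foldl_add_cons _ x [] (fun y hy => by
      have := List.of_mem_filter hy; simpa using this)]
  rfl

-- product over the distinct elements, with the "occurs exactly once" test, is pvCanon
lemma prod_ofList_eq_canon (l : List Int) :
    ((PySem.Set.ofList l).map (fun k => if l.count k = 1 then k else (1 : Int))).prod
      = pvCanon l := by
  match l with
  | [] => simp [pvCanon, PySem.Set.ofList, PySem.Set.empty]
  | x :: rest =>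
    rw [ofList_cons_filter]
    set t := rest.filter (fun y => ¬ y = x) with ht
    have hmapeq :
        (PySem.Set.ofList t).map (fun k => if (x :: rest).count k = 1 then k else (1 : Int))
          = (PySem.Set.ofList t).map (fun k => if t.count k = 1 then k else (1 : Int)) := by
      apply List.map_congr_left
      intro k hk
      have hkt : k ∈ t := by simpa using (PySem.Set.mem_ofList _ _).mp hk
      have hkx : ¬ k = x := by simpa using (List.of_mem_filter hkt)
      have hkx' : ¬ x = k := fun e => hkx e.symm
      have hc1 : (x :: rest).count k = rest.count k := by
        simp [hkx']
      have hc2 : t.count k = rest.count k := by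
        rw [ht]; exact List.count_filter (by simp [hkx, hkx'])
      rw [hc1, hc2]
    have hx1 : ((x :: rest).count x = 1) ↔ (rest.count x = 0) := by
      simp [List.count_cons]
    have ih := prod_ofList_eq_canon t
    simp only [List.map_cons, List.prod_cons, hmapeq, ih]
    rw [show pvCanon (x :: rest)
        = (if rest.count x = 0 then x else 1) * pvCanon t from by simp [pvCanon, ht]]
    congr 1
    simp only [hx1]
termination_by l.length
decreasing_by
  simpa using Nat.lt_succ_of_le (List.length_filter_le _ _)

-- on a weakly sorted list the leading run of the head is everything equal to it
lemma takeWhile_sorted (x : Int) (rest : List Int)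
    (h : (x :: rest).Pairwise (· ≤ ·)) :
    (rest.takeWhile (fun y => y == x)).length = rest.count x ∧
    rest.dropWhile (fun y => y == x) = rest.filter (fun y => ¬ y = x) := by
  induction rest with
  | nil => simp
  | cons y t ih =>
      have hx : x ≤ y := (List.pairwise_cons.mp h).1 y (by simp)
      by_cases hxy : y = x
      · subst hxy
        have h' : (y :: t).Pairwise (· ≤ ·) := (List.pairwise_cons.mp h).2
        have := ih (by
          rcases List.pairwise_cons.mp h' with ⟨h1, h2⟩
          exact List.pairwise_cons.mpr ⟨h1, h2⟩)
        simp only [List.takeWhile, List.dropWhile, beq_self_eq_true, List.count_cons,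
          List.filter] at *
        exact ⟨by simp [this.1], by simp [this.2]⟩
      · have hlt : x < y := lt_of_le_of_ne hx (fun e => hxy e.symm)
        have hno : ∀ z ∈ y :: t, z ≠ x := by
          intro z hz
          rcases List.mem_cons.mp hz with rfl | hz'
          · exact hxy
          · have h' : (y :: t).Pairwise (· ≤ ·) := (List.pairwise_cons.mp h).2
            have : y ≤ z := (List.pairwise_cons.mp h').1 z hz'
            intro e; rw [e] at this; exact absurd (lt_of_lt_of_le hlt this) (lt_irrefl x)
        constructor
        · rw [List.takeWhile_cons_of_neg (by simpa using hxy)]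
          simp [List.count_eq_zero.mpr (fun hm => hno x hm rfl)]
        · rw [List.dropWhile_cons_of_neg (by simpa using hxy)]
          rw [List.filter_eq_self.mpr (by intro z hz; simpa using hno z hz)]

lemma scanRuns_sorted (l : List Int) (p : Int) (h : l.Pairwise (· ≤ ·)) :
    pvScanRuns l p = p * pvCanon l := by
  match l with
  | [] => simp [pvScanRuns, pvCanon]

  | x :: rest =>
    obtain ⟨hrun, hdrop⟩ := takeWhile_sorted x rest h
    rw [pvScanRuns, hdrop]
    have hsorted : (rest.filter (fun y => ¬ y = x)).Pairwise (· ≤ ·) :=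
      ((List.pairwise_cons.mp h).2).sublist List.filter_sublist
    rw [scanRuns_sorted _ _ hsorted, hrun,
      show pvCanon (x :: rest)
        = (if rest.count x = 0 then x else 1) * pvCanon (rest.filter (fun y => ¬ y = x))
        from by simp [pvCanon]]
    by_cases hz : rest.count x = 0 <;> simp [hz] <;> ring
termination_by l.length
decreasing_by
  simpa using Nat.lt_succ_of_le (List.length_filter_le _ _)

lemma A_eq_canon (l : List Int) (h : l ≠ []) : productNonRepeated l = pvCanon l := by
  simp only [productNonRepeated, if_neg h]
  rw [show l.foldl (fun d i => d.modify i 0 (· + 1)) PySem.Dict.empty = PySem.Dict.counter l from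
    (PySem.Dict.counter_eq_foldl l).symm]
  rw [PySem.Dict.items_counter]
  simp only [List.foldl_map]
  rw [show ((PySem.Set.ofList l : List Int).foldl
        (fun p k => if ((l.count k : Int)) = 1 then p * k else p) 1)
      = 1 * ((PySem.Set.ofList l : List Int).map
          (fun k => if ((l.count k : Int)) = 1 then k else (1 : Int))).prod from
    foldl_if_mul (fun k : Int => ((l.count k : Int)) = 1) _ 1]
  rw [one_mul, ← prod_ofList_eq_canon l]
  congr 1
  apply List.map_congr_left
  intro k _
  have : ((l.count k : Int)) = 1 ↔ l.count k = 1 := by exact_mod_cast Iff.rfl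
  simp [this]

lemma canon_sorted (l : List Int) :
    pvCanon (PySem.List.sorted l (fun x => x) false) = pvCanon l := by
  set s := PySem.List.sorted l (fun x => x) false with hs
  have hperm : s.Perm l := PySem.List.sorted_perm l (fun x => x) false
  rw [← prod_ofList_eq_canon s, ← prod_ofList_eq_canon l]
  have hcount : ∀ k, s.count k = l.count k := fun k => hperm.count_eq k
  have hsetperm : (PySem.Set.ofList s : List Int).Perm (PySem.Set.ofList l) := by
    refine (List.perm_ext_iff_of_nodup (PySem.Set.nodup_ofList _) (PySem.Set.nodup_ofList _)).mpr ?_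
    intro a
    simp only [PySem.Set.mem_ofList]
    exact hperm.mem_iff
  calc ((PySem.Set.ofList s : List Int).map
          (fun k => if s.count k = 1 then k else (1 : Int))).prod
      = ((PySem.Set.ofList s : List Int).map
          (fun k => if l.count k = 1 then k else (1 : Int))).prod := by
        simp only [hcount]
    _ = ((PySem.Set.ofList l : List Int).map
          (fun k => if l.count k = 1 then k else (1 : Int))).prod :=
        (hsetperm.map _).prod_eq

lemma B_eq_canon (l : List Int) (h : l ≠ []) : productNonRepeated_alt l = pvCanon l := by
  simp only [productNonRepeated_alt, if_neg h]
  rw [scanRuns_sorted _ _ (by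
    simpa using PySem.List.sorted_pairwise l (fun x => x)), one_mul]
  exact canon_sorted l

-- ===== VERDICT (by name: the statement is the Claim_ definition above) =====
theorem productNonRepeated_spec : Claim_equal_productNonRepeated := by
  intro l _
  unfold Spec_productNonRepeated
  by_cases h : l = []
  · subst h; rfl
  · rw [A_eq_canon l h, B_eq_canon l h]
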